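-- pv_equiv track=rewrite | github.com/SLWRTHNU/Iris-Classic-Go | app_main.py | _find_str_after
-- ===== SOURCE A (Python) =====
-- def _find_str_after(s, key, start=0):
--     i = s.find(key, start)
--     if i < 0:
--         return None, -1
--     i += len(key)
--
--     # Allow spaces, tabs, CR, LF before the quote
--     while i < len(s) and s[i] in " \t\r\n":
--         i += 1
--
--     q1 = s.find('"', i)
--     if q1 < 0:
--         return None, -1
--     q2 = s.find('"', q1 + 1)
--     if q2 < 0:
--         return None, -1
--
--     return s[q1 + 1:q2], q2 + 1
-- ===== SOURCE B (Python) =====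
-- def _find_str_after(s, key, start=0):
--     i = s.find(key, start)
--     if i < 0:
--         return None, -1
--     buf = None  # None until the opening quote is seen, then collected chars
--     for pos in range(i + len(key), len(s)):
--         c = s[pos]
--         if c == '"':
--             if buf is None:
--                 buf = []
--             else:
--                 return "".join(buf), pos + 1
--         elif buf is not None:
--             buf.append(c)
--     return None, -1
-- ===== Notes on version B (the rewrite author's own statement) =====
-- stated objective: alternative
-- what changed: A's whitespace-skip loop plus two further str.find scans and a slice are replaced by one left-to-right state-machine pass over the characters after the key, which collects the quoted text as it goes.
import Mathlib
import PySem

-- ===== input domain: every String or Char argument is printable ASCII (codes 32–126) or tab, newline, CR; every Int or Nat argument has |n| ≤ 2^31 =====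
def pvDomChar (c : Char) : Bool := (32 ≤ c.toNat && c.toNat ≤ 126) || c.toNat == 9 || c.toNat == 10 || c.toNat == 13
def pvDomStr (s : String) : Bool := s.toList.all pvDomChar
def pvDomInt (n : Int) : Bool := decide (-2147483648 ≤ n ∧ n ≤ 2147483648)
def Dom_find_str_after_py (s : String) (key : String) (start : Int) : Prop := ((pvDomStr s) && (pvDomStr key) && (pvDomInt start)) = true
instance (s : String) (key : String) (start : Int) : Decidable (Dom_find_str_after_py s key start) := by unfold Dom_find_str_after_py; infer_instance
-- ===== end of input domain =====

-- B replaces A's whitespace-skip loop and the two further str.find scans by a single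
-- left-to-right state-machine pass over the characters after the key (objective: alternative).

-- ===== PORT A =====
-- A's `while i < len(s) and s[i] in " \t\r\n": i += 1` loop
def pvSkipWs (s : List Char) (i : Nat) : Nat :=
  if h : i < s.length then
    if s[i] = ' ' ∨ s[i] = '\t' ∨ s[i] = '\r' ∨ s[i] = '\n' then pvSkipWs s (i + 1) else i
  else i
termination_by s.length - i

def find_str_after_py (s : String) (key : String) (start : Int) : Option String × Int :=
  let i := PySem.Str.findFrom s key start          -- i = s.find(key, start)
  if i < 0 then (none, -1)
  else
    -- i += len(key), then skip " \t\r\n" (i ≥ 0 here, so toNat is exact)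
    let i2 : Nat := pvSkipWs s.toList (i.toNat + key.toList.length)
    let q1 := PySem.Chars.findFrom s.toList ['"'] (i2 : Int)     -- q1 = s.find('"', i)
    if q1 < 0 then (none, -1)
    else
      let q2 := PySem.Chars.findFrom s.toList ['"'] (q1 + 1)     -- q2 = s.find('"', q1 + 1)
      if q2 < 0 then (none, -1)
      else (some (PySem.Str.slice s (some (q1 + 1)) (some q2)), q2 + 1)

-- ===== PORT B =====
-- B's `for pos in range(i + len(key), len(s))` loop; buf = none until the opening quote
def pvScan (s : List Char) (pos : Nat) (buf : Option (List Char)) : Option String × Int :=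
  if h : pos < s.length then
    let c := s[pos]
    if c = '"' then
      match buf with
      | none => pvScan s (pos + 1) (some [])
      | some b => (some (String.ofList b), (pos : Int) + 1)     -- "".join(buf), pos + 1
    else
      match buf with
      | none => pvScan s (pos + 1) none
      | some b => pvScan s (pos + 1) (some (b ++ [c]))          -- buf.append(c)
  else (none, -1)
termination_by s.length - pos

def find_str_after_py_alt (s : String) (key : String) (start : Int) : Option String × Int :=
  let i := PySem.Str.findFrom s key start          -- i = s.find(key, start)
  if i < 0 then (none, -1)
  else pvScan s.toList (i.toNat + key.toList.length) none

-- ===== PRECONDITION & SPEC =====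
def Spec_find_str_after_py (s : String) (key : String) (start : Int) (out : Option String × Int) : Prop := out = find_str_after_py_alt s key start
instance (s : String) (key : String) (start : Int) (out : Option String × Int) : Decidable (Spec_find_str_after_py s key start out) := by unfold Spec_find_str_after_py; infer_instance

-- ===== CLAIM (what is proved, stated in full; the proofs are below) =====
def Claim_equal_find_str_after_py : Prop := ∀ (s : String) (key : String) (start : Int), Dom_find_str_after_py s key start → Spec_find_str_after_py s key start (find_str_after_py s key start)

-- ===== LEMMAS AND PROOFS =====

-- absolute position of the first '"' at index ≥ j, if any
def pvQpos (s : List Char) (j : Nat) : Option Nat := ((s.drop j).findIdx? (· = '"')).map (j + ·)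

theorem pv_find_go_singleton (c : Char) (t : List Char) : ∀ k : Nat,
    PySem.Chars.find.go [c] t k =
      match t.findIdx? (· = c) with | none => -1 | some m => ((k + m : Nat) : Int) := by
  induction t with
  | nil => intro k; simp [PySem.Chars.find.go]
  | cons h tl ih =>
    intro k
    by_cases hc : h = c
    · simp [PySem.Chars.find.go, List.isPrefixOf, hc, List.findIdx?_cons]
    · have hc' : ¬ c = h := fun e => hc e.symm
      simp [PySem.Chars.find.go, List.isPrefixOf, hc, hc', List.findIdx?_cons, ih (k+1)]
      cases htl : tl.findIdx? (· = c) with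
      | none => simp
      | some m => simp; ring

-- find with a one-char needle is findIdx?
theorem pv_find_singleton (t : List Char) (c : Char) :
    PySem.Chars.find t [c] = match t.findIdx? (· = c) with | none => -1 | some k => (k : Int) := by
  simpa [PySem.Chars.find] using pv_find_go_singleton c t 0

-- findFrom from a Nat position, expressed through pvQpos
theorem pv_findFrom_qpos (s : List Char) (j : Nat) :
    PySem.Chars.findFrom s ['"'] (j : Int) =
      match pvQpos s j with | none => -1 | some q => (q : Int) := by
  by_cases hj : j ≤ s.length
  · rw [PySem.Chars.findFrom_natCast s ['"'] j hj, pv_find_singleton]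
    unfold pvQpos
    cases h : (s.drop j).findIdx? (· = '"') with
    | none => simp
    | some k => simp
  · have hd : s.drop j = [] := List.drop_eq_nil_of_le (by omega)
    unfold pvQpos
    rw [hd]
    simp only [List.findIdx?_nil, Option.map_none]
    simp [PySem.Chars.findFrom]
    omega

theorem pv_qpos_succ (s : List Char) (j : Nat) (hj : j < s.length) (hq : ¬ s[j] = '"') :
    pvQpos s (j + 1) = pvQpos s j := by
  unfold pvQpos
  rw [List.drop_eq_getElem_cons hj, List.findIdx?_cons]
  simp [hq]
  cases h : (s.drop (j+1)).findIdx? (· = '"') with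
  | none => simp
  | some k => simp; omega

-- skipping whitespace (never '"') does not move past the first quote
theorem pv_qpos_skipWs (s : List Char) (j : Nat) : pvQpos s (pvSkipWs s j) = pvQpos s j := by
  fun_induction pvSkipWs s j with
  | case1 i h hw ih =>
    rw [ih, pv_qpos_succ s i h]
    rcases hw with h1|h1|h1|h1 <;> simp [h1]
  | case2 => rfl
  | case3 => rfl

theorem pv_qpos_ge (s : List Char) (j q : Nat) (h : pvQpos s j = some q) :
    j ≤ q ∧ q < s.length ∧ s.drop j ≠ [] := by
  unfold pvQpos at h
  cases hf : (s.drop j).findIdx? (· = '"') with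
  | none => rw [hf] at h; simp at h
  | some k =>
    rw [hf] at h; simp at h
    have hlt := List.findIdx?_eq_some_iff_findIdx_eq.mp hf |>.1
    refine ⟨by omega, ?_, ?_⟩
    · have := List.length_drop (l := s) (i := j); omega
    · intro he; rw [he] at hf; simp at hf

-- B's scan with an open buffer collects exactly up to the next quote
theorem pv_scan_some (s : List Char) (n : Nat) : ∀ pos b, s.length - pos ≤ n →
    pvScan s pos (some b) =
      (match pvQpos s pos with
      | none => (none, -1)
      | some q => (some (String.ofList (b ++ (s.drop pos).take (q - pos))), (q : Int) + 1)) := by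
  induction n with
  | zero =>
    intro pos b hle
    have hd : s.drop pos = [] := List.drop_eq_nil_of_le (by omega)
    rw [pvScan]
    simp [pvQpos, hd, show ¬ pos < s.length by omega]
  | succ n ih =>
    intro pos b hle
    by_cases h : pos < s.length
    · by_cases hc : s[pos] = '"'
      · have hq : pvQpos s pos = some pos := by
          unfold pvQpos
          rw [List.drop_eq_getElem_cons h, List.findIdx?_cons]
          simp [hc]
        rw [pvScan]
        simp [h, hc, hq]
      · have hq := pv_qpos_succ s pos h hc
        rw [pvScan]
        simp only [h, dif_pos, if_neg hc]
        rw [ih (pos+1) (b ++ [s[pos]]) (by omega), hq]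
        cases hqq : pvQpos s pos with
        | none => rfl
        | some q =>
          simp only []
          have hge : pos + 1 ≤ q := by
            have := pv_qpos_ge s (pos+1) q (hq.trans hqq)
            omega
          have hsplit : (s.drop pos).take (q - pos) = s[pos] :: (s.drop (pos+1)).take (q - (pos+1)) := by
            rw [List.drop_eq_getElem_cons h]
            rw [show q - pos = (q - (pos+1)) + 1 by omega, List.take_succ_cons]
          rw [hsplit]
          simp
    · have hd : s.drop pos = [] := List.drop_eq_nil_of_le (by omega)
      rw [pvScan]
      simp [pvQpos, hd, h]

-- B's scan before the first quote
theorem pv_scan_none (s : List Char) (n : Nat) : ∀ pos, s.length - pos ≤ n →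
    pvScan s pos none =
      (match pvQpos s pos with
      | none => (none, -1)
      | some q => pvScan s (q + 1) (some [])) := by
  induction n with
  | zero =>
    intro pos hle
    have hd : s.drop pos = [] := List.drop_eq_nil_of_le (by omega)
    rw [pvScan]
    simp [pvQpos, hd, show ¬ pos < s.length by omega]
  | succ n ih =>
    intro pos hle
    by_cases h : pos < s.length
    · by_cases hc : s[pos] = '"'
      · have hq : pvQpos s pos = some pos := by
          unfold pvQpos
          rw [List.drop_eq_getElem_cons h, List.findIdx?_cons]
          simp [hc]
        rw [pvScan]
        simp [h, hc, hq]
      · have hq := pv_qpos_succ s pos h hc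
        rw [pvScan]
        simp only [h, dif_pos, if_neg hc]
        rw [ih (pos+1) (by omega), hq]
    · have hd : s.drop pos = [] := List.drop_eq_nil_of_le (by omega)
      rw [pvScan]
      simp [pvQpos, hd, h]

theorem pv_main (s key : String) (start : Int) :
    find_str_after_py s key start = find_str_after_py_alt s key start := by
  unfold find_str_after_py find_str_after_py_alt
  by_cases hi : PySem.Str.findFrom s key start < 0
  · rw [if_pos hi, if_pos hi]
  · simp only [hi, if_false]
    set j := (PySem.Str.findFrom s key start).toNat + key.toList.length with hj
    rw [pv_findFrom_qpos s.toList (pvSkipWs s.toList j), pv_qpos_skipWs]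
    rw [pv_scan_none s.toList (s.toList.length) j (by omega)]
    cases h1 : pvQpos s.toList j with
    | none => simp
    | some q1 =>
      simp only [show ¬ ((q1 : Int) < 0) by omega, if_false]
      rw [show (q1 : Int) + 1 = ((q1 + 1 : Nat) : Int) by push_cast; ring,
        pv_findFrom_qpos s.toList (q1 + 1)]
      rw [pv_scan_some s.toList (s.toList.length) (q1+1) [] (by omega)]
      cases h2 : pvQpos s.toList (q1 + 1) with
      | none => simp
      | some q2 =>
        simp only [show ¬ ((q2 : Int) < 0) by omega, if_false]
        simp only [Prod.mk.injEq, Option.some.injEq]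
        refine ⟨?_, trivial⟩
        apply String.toList_inj.mp
        rw [PySem.Str.toList_slice, PySem.Chars.slice_eq_listSlice, PySem.List.slice_natCast]
        simp

-- ===== VERDICT (by name: the statement is the Claim_ definition above) =====
theorem find_str_after_py_spec : Claim_equal_find_str_after_py := by
  intro s key start _
  exact pv_main s key start
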